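-- pv_equiv track=rewrite | github.com/DGbolaga/Data-Structures-and-Algorithms-Specialization | Algorithmic Toolbox/module2/problem6.py | fib_mod_last_digt
-- ===== SOURCE A (Python) =====
-- def fib_mod_last_digt(num, m=10):
--     # a new sequence always begins with 0 1
--     if num == 0:
--         return 0
--     if num == 1:
--         return 1
--
--     a, b = 0, 1
--     mod = [0, 1]
--     for i in range(2, num+1):
--         a, b = b, (a+b)%m
--         mod.append(b)
--
--         if mod[-2] == 0 and mod[-1] == 1:
--             mod.pop()
--             mod.pop()
--             break
--
--     period = len(mod)
--     last_digit = mod[num % period] # fib_num is the last digit.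
--
--     return last_digit
-- ===== SOURCE B (Python) =====
-- def fib_mod_last_digt(num, m=10):
--     # Fast doubling: computes F(num) % m in O(log num) multiplications,
--     # instead of building the Pisano-period list.
--     if num < 2:
--         return num % 2
--
--     def fd(k):
--         # returns (F(k) % m, F(k+1) % m)
--         if k == 0:
--             return (0, 1 % m)
--         a, b = fd(k >> 1)
--         c = (a * (2 * b - a)) % m
--         d = (a * a + b * b) % m
--         if k & 1:
--             return (d, (c + d) % m)
--         return (c, d)
--
--     return fd(num)[0]
-- ===== Notes on version B (the rewrite author's own statement) =====
-- stated objective: faster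
-- what changed: B computes F(num) % m directly by the fast-doubling recursion (pairs (F(k)%m, F(k+1)%m) on the bits of num) instead of A's building of the Pisano-period residue list and indexing it by num % period; num < 2 returns num % 2 in both.
import Mathlib
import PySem

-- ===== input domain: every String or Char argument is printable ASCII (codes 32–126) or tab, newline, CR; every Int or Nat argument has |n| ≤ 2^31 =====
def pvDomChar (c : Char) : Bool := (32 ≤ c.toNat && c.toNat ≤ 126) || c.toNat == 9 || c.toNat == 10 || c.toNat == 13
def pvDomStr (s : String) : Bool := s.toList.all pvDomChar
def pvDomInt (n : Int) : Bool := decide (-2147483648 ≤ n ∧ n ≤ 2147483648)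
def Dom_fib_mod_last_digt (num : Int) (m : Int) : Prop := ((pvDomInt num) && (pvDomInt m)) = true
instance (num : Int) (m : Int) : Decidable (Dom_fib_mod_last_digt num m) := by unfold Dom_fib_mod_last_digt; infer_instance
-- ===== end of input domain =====

-- B replaces A's Pisano-period list construction by a fast-doubling recursion computing F(num) % m directly (objective: faster).

-- ===== PORT A =====
-- A's `for i in range(2, num+1)` loop (the index i is unused in the body); the `break` is
-- modeled by returning the list early; `mod.pop(); mod.pop()` removes the last element twice.
def fibLoopA (m : Int) : List Int → Int → Int → List Int → List Int
  | [], _, _, mod => mod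
  | _ :: rest, a, b, mod =>
    let b' := PySem.Int.mod (a + b) m
    let mod' := mod ++ [b']
    if PySem.List.pyGet? mod' (-2) = some 0 ∧ PySem.List.pyGet? mod' (-1) = some 1 then
      (mod'.dropLast).dropLast
    else
      fibLoopA m rest b b' mod'

def fib_mod_last_digt (num : Int) (m : Int) : Int :=
  if num = 0 then 0
  else if num = 1 then 1
  else
    let mod := fibLoopA m (PySem.List.pyRange 2 (num + 1) 1) 0 1 [0, 1]
    let period : Int := (mod.length : Int)
    -- mod[num % period]: the index is always in range (0 ≤ num % period < len(mod)), so IndexError cannot occur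
    (PySem.List.pyGet? mod (PySem.Int.mod num period)).getD 0

-- ===== PORT B =====
-- fd(k) of Source B: returns (F(k) % m, F(k+1) % m), recursing on k >> 1 = k / 2
def fdAux (m : Int) (k : Nat) : Int × Int :=
  if hk : k = 0 then (0, PySem.Int.mod 1 m)
  else
    let p := fdAux m (k / 2)
    let a := p.1
    let b := p.2
    let c := PySem.Int.mod (a * (2 * b - a)) m
    let d := PySem.Int.mod (a * a + b * b) m
    if k % 2 = 1 then (d, PySem.Int.mod (c + d) m) else (c, d)
termination_by k
decreasing_by exact Nat.div_lt_self (Nat.pos_of_ne_zero hk) one_lt_two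

def fib_mod_last_digt_alt (num : Int) (m : Int) : Int :=
  if num < 2 then PySem.Int.mod num 2
  else (fdAux m num.toNat).1

-- ===== PRECONDITION & SPEC =====
-- Pre_ excludes exactly the inputs with num ≥ 2 and m = 0, where Python A raises ZeroDivisionError
-- on `(a+b) % m` (B's Python raises there as well).
def Pre_fib_mod_last_digt (num : Int) (m : Int) : Prop := num < 2 ∨ m ≠ 0
instance (num : Int) (m : Int) : Decidable (Pre_fib_mod_last_digt num m) := by
  unfold Pre_fib_mod_last_digt; infer_instance

def pvWitness_fib_mod_last_digt : Int × Int := (10, 10)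

def Spec_fib_mod_last_digt (num : Int) (m : Int) (out : Int) : Prop := out = fib_mod_last_digt_alt num m
instance (num : Int) (m : Int) (out : Int) : Decidable (Spec_fib_mod_last_digt num m out) := by
  unfold Spec_fib_mod_last_digt; infer_instance

-- ===== CLAIM (what is proved, stated in full; the proofs are below) =====
def Claim_equal_fib_mod_last_digt : Prop := ∀ (num : Int) (m : Int), Dom_fib_mod_last_digt num m → Pre_fib_mod_last_digt num m → Spec_fib_mod_last_digt num m (fib_mod_last_digt num m)

-- ===== LEMMAS AND PROOFS =====

-- reference value: F(k) % m in Python semantics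
def fmv (m : Int) (k : Nat) : Int := PySem.Int.mod ((Nat.fib k : Int)) m

lemma pymod_modeq (a m : Int) : PySem.Int.mod a m ≡ a [ZMOD m] := by
  have h := PySem.Int.floordiv_mul_add_mod a m
  have h2 : PySem.Int.mod a m = a - PySem.Int.floordiv a m * m := by linarith
  rw [h2]
  simp [Int.ModEq, Int.sub_emod, Int.mul_emod_left]

lemma pymod_congr {m a b : Int} (h : a ≡ b [ZMOD m]) : PySem.Int.mod a m = PySem.Int.mod b m := by
  show Int.fmod a m = Int.fmod b m
  rw [Int.fmod_eq_fmod_iff_fmod_sub_eq_zero]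
  have hd : m ∣ (a - b) := dvd_sub_comm.mp h.dvd
  exact (PySem.Int.mod_eq_zero_iff_dvd (a - b) m).mpr hd

lemma fdAux_eq (m : Int) : ∀ k : Nat, fdAux m k = (fmv m k, fmv m (k + 1)) := by
  intro k
  induction k using Nat.strong_induction_on with
  | _ k ih =>
    rw [fdAux]
    by_cases hk : k = 0
    · subst hk
      simp [fmv, PySem.Int.mod, Int.zero_fmod]
    · simp only [dif_neg hk]
      rw [ih (k / 2) (Nat.div_lt_self (Nat.pos_of_ne_zero hk) one_lt_two)]
      set j := k / 2 with hj
      have ha := pymod_modeq ((Nat.fib j : Int)) m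
      have hb := pymod_modeq ((Nat.fib (j + 1) : Int)) m
      have hle : Nat.fib j ≤ 2 * Nat.fib (j + 1) :=
        le_trans (Nat.fib_le_fib_succ) (by omega)
      have hfib2 : ((Nat.fib (2 * j) : Int)) =
          (Nat.fib j : Int) * (2 * (Nat.fib (j + 1) : Int) - (Nat.fib j : Int)) := by
        rw [Nat.fib_two_mul]; push_cast [hle]; ring
      have hfib21 : ((Nat.fib (2 * j + 1) : Int)) =
          (Nat.fib j : Int) * (Nat.fib j : Int) + (Nat.fib (j + 1) : Int) * (Nat.fib (j + 1) : Int) := by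
        rw [Nat.fib_two_mul_add_one]; push_cast; ring
      have hc : PySem.Int.mod (fmv m j * (2 * fmv m (j + 1) - fmv m j)) m = fmv m (2 * j) := by
        apply pymod_congr
        rw [hfib2]
        exact (ha.mul ((Int.ModEq.rfl.mul hb).sub ha))
      have hd : PySem.Int.mod (fmv m j * fmv m j + fmv m (j + 1) * fmv m (j + 1)) m
          = fmv m (2 * j + 1) := by
        apply pymod_congr
        rw [hfib21]
        exact (ha.mul ha).add (hb.mul hb)
      by_cases hpar : k % 2 = 1
      · have hk1 : k = 2 * j + 1 := by omega
        simp only [if_pos hpar]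
        have hcd : PySem.Int.mod (fmv m (2 * j) + fmv m (2 * j + 1)) m = fmv m (2 * j + 2) := by
          apply pymod_congr
          have : Nat.fib (2 * j + 2) = Nat.fib (2 * j) + Nat.fib (2 * j + 1) := Nat.fib_add_two
          rw [this]
          push_cast
          exact (pymod_modeq _ m).add (pymod_modeq _ m)
        rw [hc, hd, hcd, hk1]
      · have hk0 : k = 2 * j := by omega
        simp only [if_neg hpar]
        rw [hc, hd, hk0]

-- invariant carried by A's list after the loop:
-- entries are ≡ F(k) (mod m), canonical from index 2 on, starts 0, 1, and either the loop
-- ran to completion (length = full) or the break fired (Pisano period found, and then m ≥ 2)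
def GoodA (m : Int) (full : Nat) (L : List Int) : Prop :=
  2 ≤ L.length ∧
  (∀ k, (hk : k < L.length) → L[k] ≡ ((Nat.fib k : Int)) [ZMOD m]) ∧
  (∀ k, (hk : k < L.length) → 2 ≤ k → L[k] = fmv m k) ∧
  L[0]? = some 0 ∧ L[1]? = some 1 ∧
  (L.length = full ∨
    (((Nat.fib L.length : Int)) ≡ 0 [ZMOD m] ∧ ((Nat.fib (L.length + 1) : Int)) ≡ 1 [ZMOD m] ∧ 2 ≤ m))

lemma loopA_good (m : Int) (hm : m ≠ 0) :
    ∀ (l : List Int) (mod : List Int) (a b : Int)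
      (hlen : 2 ≤ mod.length)
      (heq : ∀ k, (hk : k < mod.length) → mod[k] ≡ ((Nat.fib k : Int)) [ZMOD m])
      (hcan : ∀ k, (hk : k < mod.length) → 2 ≤ k → mod[k] = fmv m k)
      (h0 : mod[0]? = some 0) (h1 : mod[1]? = some 1)
      (ha : a ≡ ((Nat.fib (mod.length - 2) : Int)) [ZMOD m])
      (hb : b ≡ ((Nat.fib (mod.length - 1) : Int)) [ZMOD m]),
      GoodA m (mod.length + l.length) (fibLoopA m l a b mod) := by
  intro l
  induction l with
  | nil =>
    intro mod a b hlen heq hcan h0 h1 ha hb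
    simp only [fibLoopA, List.length_nil, Nat.add_zero]
    exact ⟨hlen, heq, hcan, h0, h1, Or.inl rfl⟩
  | cons x rest ih =>
    intro mod a b hlen heq hcan h0 h1 ha hb
    have hfib_i : ((Nat.fib mod.length : Int)) =
        ((Nat.fib (mod.length - 2) : Int)) + ((Nat.fib (mod.length - 1) : Int)) := by
      have h22 : mod.length - 2 + 2 = mod.length := by omega
      have h21 : mod.length - 2 + 1 = mod.length - 1 := by omega
      have hf := Nat.fib_add_two (n := mod.length - 2)
      rw [h22, h21] at hf
      exact_mod_cast congrArg (fun t : Nat => (t : Int)) hf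
    simp only [fibLoopA]
    set b' := PySem.Int.mod (a + b) m with hb'def
    have hb'eq : (a + b) ≡ ((Nat.fib mod.length : Int)) [ZMOD m] := by
      rw [hfib_i]; exact ha.add hb
    have hb'm : b' ≡ ((Nat.fib mod.length : Int)) [ZMOD m] := (pymod_modeq (a + b) m).trans hb'eq
    have hb'can : b' = fmv m mod.length := pymod_congr hb'eq
    have hlen' : (mod ++ [b']).length = mod.length + 1 := by simp
    have hgetlast : ∀ (h : mod.length < (mod ++ [b']).length), (mod ++ [b'])[mod.length] = b' :=
      fun h => List.getElem_concat_length rfl h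
    have heq' : ∀ k, (hk : k < (mod ++ [b']).length) →
        (mod ++ [b'])[k] ≡ ((Nat.fib k : Int)) [ZMOD m] := by
      intro k hk
      rcases Nat.lt_or_ge k mod.length with h | h
      · rw [List.getElem_append_left h]
        exact heq k h
      · have hk' : k = mod.length := by rw [hlen'] at hk; omega
        subst hk'
        rw [hgetlast hk]
        exact hb'm
    have hcan' : ∀ k, (hk : k < (mod ++ [b']).length) → 2 ≤ k → (mod ++ [b'])[k] = fmv m k := by
      intro k hk h2k
      rcases Nat.lt_or_ge k mod.length with h | h
      · rw [List.getElem_append_left h]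
        exact hcan k h h2k
      · have hk' : k = mod.length := by rw [hlen'] at hk; omega
        subst hk'
        rw [hgetlast hk]
        exact hb'can
    have h0' : (mod ++ [b'])[0]? = some 0 := by
      rw [List.getElem?_append_left (by omega)]; exact h0
    have h1' : (mod ++ [b'])[1]? = some 1 := by
      rw [List.getElem?_append_left (by omega)]; exact h1
    by_cases hbr : PySem.List.pyGet? (mod ++ [b']) (-2) = some 0 ∧
        PySem.List.pyGet? (mod ++ [b']) (-1) = some 1
    · -- break fired
      rw [if_pos hbr]
      obtain ⟨hbm2, hbm1⟩ := hbr
      have hb'1 : b' = 1 := by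
        rw [PySem.List.pyGet?_neg_one_append_singleton] at hbm1
        exact Option.some.inj hbm1
      have hpen : mod[mod.length - 1]'(by omega) = 0 := by
        rw [PySem.List.pyGet?_neg_ofNat (mod ++ [b']) 2 (by omega) (by rw [hlen']; omega)] at hbm2
        rw [hlen'] at hbm2
        have hidx : mod.length + 1 - 2 = mod.length - 1 := by omega
        rw [hidx] at hbm2
        rw [List.getElem?_append_left (by omega)] at hbm2
        rw [List.getElem?_eq_getElem (by omega)] at hbm2
        exact Option.some.inj hbm2
      have hi3 : 3 ≤ mod.length := by
        by_contra hc
        have hi2 : mod.length = 2 := by omega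
        have hm1 : mod[1]'(by omega) = 1 := by
          have hh := h1
          rw [List.getElem?_eq_getElem (by omega)] at hh
          exact Option.some.inj hh
        have : mod[mod.length - 1]'(by omega) = mod[1]'(by omega) := by
          congr 1 <;> omega
        rw [this, hm1] at hpen
        exact one_ne_zero hpen
      have hdrop : ((mod ++ [b']).dropLast).dropLast = mod.dropLast := by
        rw [List.dropLast_concat]
      rw [hdrop]
      have hLlen : mod.dropLast.length = mod.length - 1 := by simp
      have hmge2 : 2 ≤ m := by
        rcases lt_trichotomy m 0 with h | h | h
        · have hbd := (PySem.Int.mod_neg_bounds (a + b) h).2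
          rw [← hb'def, hb'1] at hbd
          omega
        · exact absurd h hm
        · have hlt := PySem.Int.mod_lt (a := a + b) h
          rw [← hb'def, hb'1] at hlt
          omega
      refine ⟨by omega, ?_, ?_, ?_, ?_, Or.inr ⟨?_, ?_, hmge2⟩⟩
      · intro k hk
        rw [List.getElem_dropLast]
        exact heq k (by rw [hLlen] at hk; omega)
      · intro k hk h2k
        rw [List.getElem_dropLast]
        exact hcan k (by rw [hLlen] at hk; omega) h2k
      · rw [List.getElem?_eq_getElem (by rw [hLlen]; omega), List.getElem_dropLast]
        have hh := h0
        rw [List.getElem?_eq_getElem (by omega)] at hh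
        exact hh
      · rw [List.getElem?_eq_getElem (by rw [hLlen]; omega), List.getElem_dropLast]
        have hh := h1
        rw [List.getElem?_eq_getElem (by omega)] at hh
        exact hh
      · rw [hLlen]
        have hq := heq (mod.length - 1) (by omega)
        rw [hpen] at hq
        exact hq.symm
      · rw [hLlen]
        have hidx : mod.length - 1 + 1 = mod.length := by omega
        rw [hidx]
        rw [hb'1] at hb'm
        exact hb'm.symm
    · rw [if_neg hbr]
      have hres := ih (mod ++ [b']) b b' (by rw [hlen']; omega)
        heq' hcan' h0' h1'
        (by rw [hlen']
            have hidx : mod.length + 1 - 2 = mod.length - 1 := by omega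
            rw [hidx]; exact hb)
        (by rw [hlen']
            have hidx : mod.length + 1 - 1 = mod.length := by omega
            rw [hidx]; exact hb'm)
      have hlenfix : (mod ++ [b']).length + rest.length = mod.length + (x :: rest).length := by
        rw [hlen']; simp only [List.length_cons]; omega
      rw [hlenfix] at hres
      exact hres

-- periodicity: if F(p) ≡ 0 and F(p+1) ≡ 1 (mod m), the Fibonacci residues repeat with period p
lemma fib_period (m : Int) (p : Nat)
    (hp0 : ((Nat.fib p : Int)) ≡ 0 [ZMOD m]) (hp1 : ((Nat.fib (p + 1) : Int)) ≡ 1 [ZMOD m]) :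
    ∀ n : Nat, ((Nat.fib (n + p) : Int)) ≡ ((Nat.fib n : Int)) [ZMOD m] := by
  intro n
  cases n with
  | zero => simpa using hp0
  | succ t =>
    have hadd := Nat.fib_add p t
    have hidx : p + t + 1 = t + 1 + p := by omega
    rw [hidx] at hadd
    rw [hadd]
    push_cast
    calc ((Nat.fib p : Int)) * (Nat.fib t : Int) + (Nat.fib (p + 1) : Int) * (Nat.fib (t + 1) : Int)
        ≡ 0 * (Nat.fib t : Int) + 1 * (Nat.fib (t + 1) : Int) [ZMOD m] :=
          (hp0.mul Int.ModEq.rfl).add (hp1.mul Int.ModEq.rfl)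
      _ = ((Nat.fib (t + 1) : Int)) := by ring

lemma fib_period_mul (m : Int) (p : Nat)
    (hp0 : ((Nat.fib p : Int)) ≡ 0 [ZMOD m]) (hp1 : ((Nat.fib (p + 1) : Int)) ≡ 1 [ZMOD m]) :
    ∀ (q n : Nat), ((Nat.fib (n + q * p) : Int)) ≡ ((Nat.fib n : Int)) [ZMOD m] := by
  intro q
  induction q with
  | zero => intro n; simp
  | succ q ihq =>
    intro n
    have h1 : n + (q + 1) * p = (n + q * p) + p := by ring
    rw [h1]
    exact (fib_period m p hp0 hp1 (n + q * p)).trans (ihq n)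

lemma good_lookup (m num : Int) (h2 : 2 ≤ num) (L : List Int)
    (hg : GoodA m (num.toNat + 1) L) :
    (PySem.List.pyGet? L (PySem.Int.mod num (L.length : Int))).getD 0 = fmv m num.toNat := by
  obtain ⟨hlen, heq, hcan, h0, h1, hper⟩ := hg
  have hp : (0 : Int) < (L.length : Int) := by exact_mod_cast (by omega : 0 < L.length)
  rw [PySem.Int.mod_eq_emod_of_pos hp]
  set r : Int := num % (L.length : Int) with hr
  have hr0 : 0 ≤ r := Int.emod_nonneg num (by omega)
  have hrlt : r < (L.length : Int) := Int.emod_lt_of_pos num hp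
  have hrn : r.toNat = num.toNat % L.length := by
    have hcast : num % (L.length : Int) = ((num.toNat % L.length : Nat) : Int) := by
      conv_lhs => rw [show num = ((num.toNat : Nat) : Int) from by omega]
      rw [← Int.natCast_mod]
    rw [hr, hcast, Int.toNat_natCast]
  rw [PySem.List.pyGet?_eq_some_getElem L hr0 hrlt, Option.getD_some]
  rcases hper with hful | ⟨hp0, hp1, hm2⟩
  · -- no break: length = num.toNat + 1, the index is num itself
    have hrnum : r.toNat = num.toNat := by
      rw [hrn, hful]
      exact Nat.mod_eq_of_lt (by omega)
    rw [hcan r.toNat (by omega) (by omega), hrnum]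
  · -- break: use periodicity of Fibonacci residues
    have hsplit : num.toNat = num.toNat % L.length + (num.toNat / L.length) * L.length :=
      (Nat.mod_add_div' num.toNat L.length).symm
    have hcong : ((Nat.fib num.toNat : Int)) ≡ ((Nat.fib (num.toNat % L.length) : Int)) [ZMOD m] := by
      conv_lhs => rw [hsplit]
      exact fib_period_mul m L.length hp0 hp1 (num.toNat / L.length) (num.toNat % L.length)
    rw [← hrn] at hcong
    rcases Nat.lt_or_ge r.toNat 2 with hsm | hbig
    · have h01 : r.toNat = 0 ∨ r.toNat = 1 := by omega
      rcases h01 with h01 | h01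
      · -- r = 0 : L[0] = 0 and F(num) ≡ 0 (mod m)
        simp only [h01]
        have hL0 : L[0]'(by omega) = 0 := by
          have hh := h0
          rw [List.getElem?_eq_getElem (by omega)] at hh
          exact Option.some.inj hh
        rw [hL0]
        have : fmv m num.toNat = PySem.Int.mod 0 m := by
          apply pymod_congr
          rw [h01] at hcong
          simpa using hcong
        rw [this]
        simp [PySem.Int.mod, Int.zero_fmod]
      · -- r = 1 : L[1] = 1 and F(num) ≡ 1 (mod m), with 2 ≤ m the canonical value is 1
        simp only [h01]
        have hL1 : L[1]'(by omega) = 1 := by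
          have hh := h1
          rw [List.getElem?_eq_getElem (by omega)] at hh
          exact Option.some.inj hh
        rw [hL1]
        have hc1 : fmv m num.toNat = PySem.Int.mod 1 m := by
          apply pymod_congr
          rw [h01] at hcong
          simpa using hcong
        rw [hc1, PySem.Int.mod_eq_emod_of_pos (by omega)]
        exact (Int.emod_eq_of_lt (by omega) (by omega)).symm
    · -- r ≥ 2 : the stored entry is canonical
      rw [hcan r.toNat (by omega) hbig]
      exact (pymod_congr hcong).symm

lemma A_eq (m num : Int) (hm : m ≠ 0) (h2 : 2 ≤ num) :
    fib_mod_last_digt num m = fmv m num.toNat := by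
  unfold fib_mod_last_digt
  rw [if_neg (by omega), if_neg (by omega)]
  have hgood := loopA_good m hm (PySem.List.pyRange 2 (num + 1) 1) [0, 1] 0 1
    (by simp)
    (by intro k hk
        simp only [List.length_cons, List.length_nil] at hk
        interval_cases k <;> simp [Nat.fib])
    (by intro k hk h2k
        simp only [List.length_cons, List.length_nil] at hk
        omega)
    (by simp) (by simp)
    (by simp [Nat.fib])
    (by simp [Nat.fib])
  have hrange : (PySem.List.pyRange 2 (num + 1) 1).length = (num - 1).toNat := by
    rw [PySem.List.length_pyRange_one]
    congr 1
    omega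
  rw [hrange] at hgood
  have hfull : ([0, 1] : List Int).length + (num - 1).toNat = num.toNat + 1 := by
    simp only [List.length_cons, List.length_nil]
    omega
  rw [hfull] at hgood
  exact good_lookup m num h2 _ hgood

lemma B_eq (m num : Int) (h2 : 2 ≤ num) :
    fib_mod_last_digt_alt num m = fmv m num.toNat := by
  unfold fib_mod_last_digt_alt
  rw [if_neg (by omega)]
  rw [fdAux_eq]

lemma small_eq (m num : Int) (h : num < 2) :
    fib_mod_last_digt num m = fib_mod_last_digt_alt num m := by
  unfold fib_mod_last_digt fib_mod_last_digt_alt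
  rw [if_pos h]
  by_cases h0 : num = 0
  · subst h0
    simp [PySem.Int.mod, Int.zero_fmod]
  · by_cases h1 : num = 1
    · subst h1
      norm_num
    · rw [if_neg h0, if_neg h1]
      have hnil : PySem.List.pyRange 2 (num + 1) 1 = [] :=
        PySem.List.pyRange_one_eq_nil (by omega)
      rw [hnil]
      simp only [fibLoopA]
      have hlen : (([0, 1] : List Int).length : Int) = 2 := by simp
      rw [hlen]
      have hmod : PySem.Int.mod num 2 = num % 2 := PySem.Int.mod_eq_emod_of_pos (by omega)
      rw [hmod]
      have h01 : num % 2 = 0 ∨ num % 2 = 1 := by omega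
      rcases h01 with he | he <;> rw [he] <;> decide

-- ===== VERDICT (by name: the statement is the Claim_ definition above) =====
theorem fib_mod_last_digt_spec : Claim_equal_fib_mod_last_digt := by
  intro num m _hdom hpre
  unfold Spec_fib_mod_last_digt
  by_cases h : num < 2
  · exact small_eq m num h
  · have hm : m ≠ 0 := by
      rcases hpre with h' | h'
      · exact absurd h' h
      · exact h'
    rw [A_eq m num hm (by omega), B_eq m num (by omega)]
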